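-- pv_equiv track=rewrite | github.com/manosmax/vaseis_final_project | domain.py | discount_percent_for_months
-- ===== SOURCE A (Python) =====
-- DISCOUNT_BY_MONTHS = {
--     1: 0,
--     3: 5,
--     6: 10,
--     12: 15,
-- }
--
-- def discount_percent_for_months(months):
--     """Υπολογίζει την έκπτωση που αντιστοιχεί στη διάρκεια συμβολαίου."""
--     if not months:
--         return 0
--     percent = 0
--     for term, value in sorted(DISCOUNT_BY_MONTHS.items()):
--         if months >= term:
--             percent = value
--     return percent
-- ===== SOURCE B (Python) =====
-- def discount_percent_for_months(months):
--     """Υπολογίζει την έκπτωση που αντιστοιχεί στη διάρκεια συμβολαίου."""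
--     if not months:
--         return 0
--     if months >= 12:
--         return 15
--     if months >= 6:
--         return 10
--     if months >= 3:
--         return 5
--     return 0
-- ===== Notes on version B (the rewrite author's own statement) =====
-- stated objective: simpler
-- what changed: Replaced the data-driven scan over the sorted DISCOUNT_BY_MONTHS table (tracking a running percent accumulator) with a direct descending if-cascade over the thresholds with early returns, no table maintained.
import Mathlib
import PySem

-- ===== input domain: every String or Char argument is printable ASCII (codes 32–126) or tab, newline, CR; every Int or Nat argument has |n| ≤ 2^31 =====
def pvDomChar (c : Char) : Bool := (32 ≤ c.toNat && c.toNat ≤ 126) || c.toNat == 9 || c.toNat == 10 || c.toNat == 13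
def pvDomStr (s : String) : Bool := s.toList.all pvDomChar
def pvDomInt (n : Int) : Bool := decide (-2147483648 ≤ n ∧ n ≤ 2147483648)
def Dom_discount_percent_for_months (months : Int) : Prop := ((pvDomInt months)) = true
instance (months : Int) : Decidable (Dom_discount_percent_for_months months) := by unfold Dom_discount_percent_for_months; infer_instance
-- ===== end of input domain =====

-- B replaces A's scan over the sorted discount table with a direct descending threshold cascade (simpler).
-- ===== PORT A =====
-- A: if not months → 0; else fold over sorted table, keeping the last value whose term ≤ months.
def discount_percent_for_months (months : Int) : Int :=
  if months = 0 then 0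
  else
    -- sorted on (Int,Int) pairs: dict keys are distinct, so Python's tuple sort orders by the key (first component)
    (PySem.List.sorted (PySem.Dict.items
        ((PySem.Dict.empty : PySem.Dict Int Int).insert 1 0 |>.insert 3 5 |>.insert 6 10 |>.insert 12 15)) (fun tv => tv.1) false).foldl
      (fun percent tv => if months ≥ tv.1 then tv.2 else percent) 0

-- ===== PORT B =====
-- B: direct descending threshold cascade, one honest line per bucket.
def discount_percent_for_months_alt (months : Int) : Int :=
  if months = 0 then 0
  else if months ≥ 12 then 15
  else if months ≥ 6 then 10
  else if months ≥ 3 then 5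
  else 0

-- ===== PRECONDITION & SPEC =====
def Spec_discount_percent_for_months (months : Int) (out : Int) : Prop := out = discount_percent_for_months_alt months
instance (months : Int) (out : Int) : Decidable (Spec_discount_percent_for_months months out) := by unfold Spec_discount_percent_for_months; infer_instance

-- ===== CLAIM (what is proved, stated in full; the proofs are below) =====
def Claim_equal_discount_percent_for_months : Prop := ∀ (months : Int), Dom_discount_percent_for_months months → Spec_discount_percent_for_months months (discount_percent_for_months months)

-- ===== LEMMAS AND PROOFS =====

-- ===== VERDICT (by name: the statement is the Claim_ definition above) =====
theorem pv_table_sorted :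
    PySem.List.sorted (PySem.Dict.items
        ((PySem.Dict.empty : PySem.Dict Int Int).insert 1 0 |>.insert 3 5 |>.insert 6 10 |>.insert 12 15))
      (fun tv => tv.1) false = [(1, 0), (3, 5), (6, 10), (12, 15)] := by decide

theorem discount_percent_for_months_spec : Claim_equal_discount_percent_for_months := by
  intro m _
  unfold Spec_discount_percent_for_months discount_percent_for_months discount_percent_for_months_alt
  rw [pv_table_sorted]
  simp only [List.foldl]
  split_ifs <;> omega
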